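-- pv_equiv track=rewrite | github.com/parente/dim-game | dev/convert.py | id_to_name
-- ===== SOURCE A (Python) =====
-- visual_names = {
--     'masterBathroomMirror': 'Mirror',
--     'deskKey': 'Small Key',
--     'bedroomRecording': 'Recording',
--     'studyRecording': 'Recording',
--     'starHole': 'Star Shaped Hole',
--     'eleanor2': 'Eleanor',
--     'lobby': 'Main Lobby',
--     'operatingRoomRecording': 'Recording',
--     'masterBedroomRecording': 'Recording',
--     'masterBedroomDeskKey': 'Desk Key',
--     'masterBedroomDesk': 'Desk',
--     'masterBedroomBed': 'Bed',
--     'masterBathroomStarHole': 'Star Shaped Hole',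
--     'barnSwitch': 'Switch',
--     'eleanorsRoom': 'Holding Room',
--     'garageDoor': 'Kitchen Door',
--     'mazeDoor': 'Basement Door',
--     'study': 'Study Room',
--     'trappedHallway': 'Downstairs Hallway',
--     'trappedHallwayDoor': 'Downstairs Hallway Door',
--     'trappedHallwayDoorKey': 'Downstairs Hallway Key'
-- }
--
-- def id_to_name(text):
--     arr = []
--     if text in visual_names:
--         return visual_names[text]
--     for i, c in enumerate(text):
--         if i == 0:
--             arr.append(c.upper())
--         elif c.isupper():
--             arr.append(' ')
--             arr.append(c)
--         else:
--             arr.append(c)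
--     return ''.join(arr)
-- ===== SOURCE B (Python) =====
-- import re
--
-- # The table is kept as one packed text blob, parsed into a dict at import time.
-- _TABLE = """masterBathroomMirror:Mirror
-- deskKey:Small Key
-- bedroomRecording:Recording
-- studyRecording:Recording
-- starHole:Star Shaped Hole
-- eleanor2:Eleanor
-- lobby:Main Lobby
-- operatingRoomRecording:Recording
-- masterBedroomRecording:Recording
-- masterBedroomDeskKey:Desk Key
-- masterBedroomDesk:Desk
-- masterBedroomBed:Bed
-- masterBathroomStarHole:Star Shaped Hole
-- barnSwitch:Switch
-- eleanorsRoom:Holding Room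
-- garageDoor:Kitchen Door
-- mazeDoor:Basement Door
-- study:Study Room
-- trappedHallway:Downstairs Hallway
-- trappedHallwayDoor:Downstairs Hallway Door
-- trappedHallwayDoorKey:Downstairs Hallway Key"""
--
-- visual_names = {}
-- for _line in _TABLE.split('\n'):
--     _key, _, _value = _line.partition(':')
--     visual_names[_key] = _value
--
--
-- def id_to_name(text):
--     name = visual_names.get(text)
--     if name is not None:
--         return name
--     # split into segments, a new segment starting before each uppercase letter
--     parts = [p for p in re.split('(?=[A-Z])', text) if p]
--     if not parts:
--         return ''
--     parts[0] = parts[0][0].upper() + parts[0][1:]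
--     return ' '.join(parts)
-- ===== Notes on version B (the rewrite author's own statement) =====
-- stated objective: alternative
-- what changed: B stores the name table as one packed string parsed into a dict at import (instead of a dict literal) and builds the display name by regex-splitting the id into uppercase-led segments and joining them with spaces (instead of A's index-tracking char-accumulator loop).
import Mathlib
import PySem

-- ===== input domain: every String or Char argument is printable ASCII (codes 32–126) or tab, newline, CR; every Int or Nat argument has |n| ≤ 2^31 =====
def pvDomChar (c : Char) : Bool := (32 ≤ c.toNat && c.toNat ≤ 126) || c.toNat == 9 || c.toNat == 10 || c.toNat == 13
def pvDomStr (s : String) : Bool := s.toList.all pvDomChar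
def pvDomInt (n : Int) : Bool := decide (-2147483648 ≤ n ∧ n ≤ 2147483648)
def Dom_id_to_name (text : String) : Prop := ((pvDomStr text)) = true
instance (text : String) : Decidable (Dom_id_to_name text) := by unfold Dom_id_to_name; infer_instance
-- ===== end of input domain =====

-- B stores the name table as one packed text blob parsed into a dict at load time, and builds the
-- display name by splitting the id into uppercase-led segments joined with ' ' (alternative; same cost).


-- ===== PORT A =====
-- A's module-level visual_names dict literal
def pvVisualNames : PySem.Dict String String := PySem.Dict.mk [
  ("masterBathroomMirror", "Mirror"),
  ("deskKey", "Small Key"),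
  ("bedroomRecording", "Recording"),
  ("studyRecording", "Recording"),
  ("starHole", "Star Shaped Hole"),
  ("eleanor2", "Eleanor"),
  ("lobby", "Main Lobby"),
  ("operatingRoomRecording", "Recording"),
  ("masterBedroomRecording", "Recording"),
  ("masterBedroomDeskKey", "Desk Key"),
  ("masterBedroomDesk", "Desk"),
  ("masterBedroomBed", "Bed"),
  ("masterBathroomStarHole", "Star Shaped Hole"),
  ("barnSwitch", "Switch"),
  ("eleanorsRoom", "Holding Room"),
  ("garageDoor", "Kitchen Door"),
  ("mazeDoor", "Basement Door"),
  ("study", "Study Room"),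
  ("trappedHallway", "Downstairs Hallway"),
  ("trappedHallwayDoor", "Downstairs Hallway Door"),
  ("trappedHallwayDoorKey", "Downstairs Hallway Key")]

-- A: 'for i, c in enumerate(text)' building arr (a list of chars), then ''.join(arr)
def id_to_name (text : String) : String :=
  if pvVisualNames.contains text then
    (pvVisualNames.get? text).getD ""
  else
    String.ofList ((PySem.List.enumerate text.toList 0).foldl
      (fun arr (p : Int × Char) =>
        if p.1 == 0 then arr ++ [PySem.Chars.upperChar p.2]
        else if PySem.Chars.isupper p.2 then arr ++ [' ', p.2]
        else arr ++ [p.2]) [])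

-- ===== PORT B =====
-- B's module-level packed table _TABLE
def pvTable : List Char := ("masterBathroomMirror:Mirror\ndeskKey:Small Key\nbedroomRecording:Recording\nstudyRecording:Recording\nstarHole:Star Shaped Hole\neleanor2:Eleanor\nlobby:Main Lobby\noperatingRoomRecording:Recording\nmasterBedroomRecording:Recording\nmasterBedroomDeskKey:Desk Key\nmasterBedroomDesk:Desk\nmasterBedroomBed:Bed\nmasterBathroomStarHole:Star Shaped Hole\nbarnSwitch:Switch\neleanorsRoom:Holding Room\ngarageDoor:Kitchen Door\nmazeDoor:Basement Door\nstudy:Study Room\ntrappedHallway:Downstairs Hallway\ntrappedHallwayDoor:Downstairs Hallway Door\ntrappedHallwayDoorKey:Downstairs Hallway Key").toList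

-- str.partition(':'): the parts before / after the first ':' (exact for lines containing ':';
-- the separator itself, returned but unused by B's python, is dropped)
def pvPartitionColon : List Char → List Char × List Char
  | [] => ([], [])
  | c :: rest =>
      if c = ':' then ([], rest)
      else
        let (k, v) := pvPartitionColon rest
        (c :: k, v)

-- B's module-level load loop: for _line in _TABLE.split('\n'): visual_names[_key] = _value
def pvVisualNamesB : PySem.Dict String String :=
  (PySem.Chars.splitOn pvTable ['\n']).foldl
    (fun d line =>
      let (k, v) := pvPartitionColon line
      d.insert (String.ofList k) (String.ofList v))
    PySem.Dict.empty

-- re.split('(?=[A-Z])', text) with empty pieces filtered out: the nonempty segments of text,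
-- a new segment starting before each ASCII uppercase letter; each segment is (head, tail).
def pvSplitUpper : List Char → List (Char × List Char)
  | [] => []
  | c :: rest =>
      match pvSplitUpper rest with
      | [] => [(c, [])]
      | (r, s) :: ss =>
          if 'A' ≤ r ∧ r ≤ 'Z' then (c, []) :: (r, s) :: ss
          else (c, r :: s) :: ss

-- B: dict .get, then the segment split; parts[0] gets its head uppercased, then ' '.join(parts)
def id_to_name_alt (text : String) : String :=
  match pvVisualNamesB.get? text with
  | some name => name
  | none =>
      match pvSplitUpper text.toList with
      | [] => ""
      | (c, s) :: ss =>
          String.ofList (PySem.Chars.join [' ']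
            ((PySem.Chars.upperChar c :: s) :: ss.map (fun p => p.1 :: p.2)))

-- ===== PRECONDITION & SPEC =====
def Spec_id_to_name (text : String) (out : String) : Prop := out = id_to_name_alt text
instance (text : String) (out : String) : Decidable (Spec_id_to_name text out) := by unfold Spec_id_to_name; infer_instance

-- ===== CLAIM (what is proved, stated in full; the proofs are below) =====
def Claim_equal_id_to_name : Prop := ∀ (text : String), Dom_id_to_name text → Spec_id_to_name text (id_to_name text)

-- ===== LEMMAS AND PROOFS =====

-- the two module-level tables denote the same dict
set_option maxRecDepth 40000 in
set_option maxHeartbeats 2000000 in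
theorem pvVisualNamesB_eq : pvVisualNamesB = pvVisualNames := by decide

-- per-char expansion of the tail in A's loop
def pvExpand (d : Char) : List Char :=
  if 'A' ≤ d ∧ d ≤ 'Z' then [' ', d] else [d]

-- A's loop body on the tail (indices ≥ 1) appends exactly pvExpand of each char.
theorem id_to_name_loop (rest : List Char) :
    ∀ (arr : List Char) (s : Int), 0 < s →
    (PySem.List.enumerate rest s).foldl
      (fun arr (p : Int × Char) =>
        if p.1 == 0 then arr ++ [PySem.Chars.upperChar p.2]
        else if PySem.Chars.isupper p.2 then arr ++ [' ', p.2]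
        else arr ++ [p.2]) arr
      = arr ++ rest.flatMap pvExpand := by
  induction rest with
  | nil => intro arr s hs; simp [PySem.List.enumerate_nil]
  | cons c cs ih =>
      intro arr s hs
      rw [PySem.List.enumerate_cons, List.foldl_cons]
      have hne : (s == (0 : Int)) = false := by simp; omega
      rw [ih _ (s + 1) (by omega)]
      simp only [hne, Bool.false_eq_true, if_false, List.flatMap_cons, PySem.Chars.isupper, pvExpand]
      by_cases h : 'A' ≤ c ∧ c ≤ 'Z'
      · simp [h.1, h.2, List.append_assoc]
      · have : (decide ('A' ≤ c) && decide (c ≤ 'Z')) = false := by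
          rcases not_and_or.mp h with h' | h' <;> simp [h']
        simp [this, h, List.append_assoc]

-- B's split of a nonempty list: first segment starts with the first char, and joining the
-- segments with ' ' (past the first char) reproduces A's per-char expansion of the tail.
-- unfolding equation for pvSplitUpper on a cons
theorem pvSplitUpper_cons (c : Char) (rest : List Char) :
    pvSplitUpper (c :: rest) =
      match pvSplitUpper rest with
      | [] => [(c, [])]
      | (r, s) :: ss =>
          if 'A' ≤ r ∧ r ≤ 'Z' then (c, []) :: (r, s) :: ss
          else (c, r :: s) :: ss := rfl

theorem pvSplitUpper_spec (rest : List Char) : ∀ (c : Char), ∃ s ss,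
    pvSplitUpper (c :: rest) = (c, s) :: ss ∧
    s ++ ss.flatMap (fun p => ' ' :: p.1 :: p.2) = rest.flatMap pvExpand := by
  induction rest with
  | nil => intro c; exact ⟨[], [], by simp [pvSplitUpper]⟩
  | cons r rs ih =>
      intro c
      obtain ⟨s, ss, h1, h2⟩ := ih r
      by_cases hu : 'A' ≤ r ∧ r ≤ 'Z'
      · refine ⟨[], (r, s) :: ss, ?_, ?_⟩
        · rw [pvSplitUpper_cons, h1]; simp [hu]
        · simp [List.flatMap_cons, h2, pvExpand, hu]
      · refine ⟨r :: s, ss, ?_, ?_⟩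
        · rw [pvSplitUpper_cons, h1]; simp [hu]
        · simp [List.flatMap_cons, h2, pvExpand, hu]

-- ' '.join of a nonempty list of segments, as head ++ flatMap
theorem pvJoin_space (a : List Char) (ls : List (List Char)) :
    PySem.Chars.join [' '] (a :: ls) = a ++ ls.flatMap (fun t => ' ' :: t) := by
  induction ls generalizing a with
  | nil => simp [PySem.Chars.join_singleton]
  | cons b ls ih => rw [PySem.Chars.join_cons_cons, ih b]; simp

-- ===== VERDICT (by name: the statement is the Claim_ definition above) =====
theorem id_to_name_spec : Claim_equal_id_to_name := by
  intro text _
  unfold Spec_id_to_name id_to_name id_to_name_alt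
  rw [pvVisualNamesB_eq]
  by_cases hc : pvVisualNames.contains text = true
  · rw [PySem.Dict.contains_eq_isSome_get?] at hc
    cases hg : pvVisualNames.get? text with
    | none => rw [hg] at hc; simp at hc
    | some v => simp [PySem.Dict.contains_eq_isSome_get?, hg]
  · have hg : pvVisualNames.get? text = none := by
      rw [PySem.Dict.contains_eq_isSome_get?] at hc
      cases hg : pvVisualNames.get? text with
      | none => rfl
      | some v => rw [hg] at hc; simp at hc
    simp only [hc, Bool.false_eq_true, if_false, hg]
    cases htl : text.toList with
    | nil => simp [PySem.List.enumerate_nil, pvSplitUpper]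
    | cons c cs =>
        obtain ⟨s, ss, h1, h2⟩ := pvSplitUpper_spec cs c
        rw [h1]
        rw [PySem.List.enumerate_cons, List.foldl_cons]
        simp only [beq_self_eq_true, if_true, List.nil_append]
        have h01 : (0:Int)+1 = 1 := by norm_num
        rw [h01, id_to_name_loop cs [PySem.Chars.upperChar c] 1 (by omega)]
        rw [pvJoin_space, ← h2]
        simp [List.flatMap_map]
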